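-- pv_equiv track=rewrite | github.com/Dev-Clair/Python-Beginner_Challenges | Challenge-50_Days_of_Python/Week_03/Day_20.py | reversed_list
-- ===== SOURCE A (Python) =====
-- def reversed_list(str_inp: str) -> list:
--     """
--         takes a string of words as argument
--         checks if each element contains a character in uppercase
--         returns a reversed list of words containing uppercase characters only
--     """
--     # Declare and initialize an empty list
--     emp_list = []
--     # Convert string argument to list using the split function
--     new_list = str_inp.split()
--     # Use a for loop to iterate the list and
--     for i in range(len(new_list)):
--         # an inner for loop to iterate individual list -string- element
--         for j in new_list[i]:
--             if j == j.upper():  # if the character equals the character.upper()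
--                 # append element to empty list
--                 emp_list.append(((new_list[i])[::-1]))
--             else:
--                 continue
--     return emp_list
-- ===== SOURCE B (Python) =====
-- def reversed_list(str_inp: str) -> list:
--     # Single char-level scan: manual tokenization (no split, no slicing); the
--     # current word is buffered and its reversal emitted n times at each boundary.
--     out = []
--     buf = []   # characters of the word being read, in order
--     n = 0      # how many chars of the current word satisfy c == c.upper()
--     for c in str_inp:
--         if c.isspace():
--             out += [''.join(reversed(buf))] * n
--             buf = []
--             n = 0
--         else:
--             buf.append(c)
--             if c == c.upper():
--                 n += 1
--     out += [''.join(reversed(buf))] * n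
--     return out
-- ===== Notes on version B (the rewrite author's own statement) =====
-- stated objective: alternative
-- what changed: B drops split() and slicing entirely: one character-level scan tokenizes the string by hand into a char buffer, counts characters equal to their upper() as it reads, and at each word boundary emits the reversed word (join of reversed buffer) that many times.
import Mathlib
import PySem

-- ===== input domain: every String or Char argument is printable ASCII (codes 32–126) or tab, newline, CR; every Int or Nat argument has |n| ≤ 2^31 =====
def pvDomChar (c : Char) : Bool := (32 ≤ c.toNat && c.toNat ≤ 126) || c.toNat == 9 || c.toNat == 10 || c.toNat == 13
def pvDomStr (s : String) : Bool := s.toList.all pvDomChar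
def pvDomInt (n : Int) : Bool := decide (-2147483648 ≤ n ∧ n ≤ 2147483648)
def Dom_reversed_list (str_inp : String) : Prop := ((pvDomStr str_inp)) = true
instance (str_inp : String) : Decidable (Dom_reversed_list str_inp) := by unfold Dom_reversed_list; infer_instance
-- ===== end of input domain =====

-- B replaces split()+slicing with a single character-level scan that tokenizes by
-- hand and builds each word's reversal incrementally (alternative algorithm, same output).

-- ===== PORT A =====
-- for i in range(len(new_list)): for j in new_list[i]: if j == j.upper(): emp_list.append(new_list[i][::-1])
def reversed_list (str_inp : String) : List String :=
  let new_list := PySem.Str.split₀ str_inp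
  (PySem.List.pyRange 0 new_list.length 1).foldl
    (fun emp_list i =>
      let w := PySem.List.pyGetD new_list i ""
      w.toList.foldl
        (fun acc j =>
          if j == PySem.Chars.upperChar j then
            acc ++ [(PySem.Str.slice? w none none (-1)).getD ""]
          else acc)
        emp_list)
    []

-- ===== PORT B =====
-- single scan; Python's `''.join(reversed(buf))` is ported as String.ofList buf.reverse (exact).
def reversed_list_alt (str_inp : String) : List String :=
  let st := str_inp.toList.foldl
    (fun (s : List String × List Char × Nat) c =>
      let (out, buf, n) := s
      if PySem.Chars.isspace c then
        (out ++ List.replicate n (String.ofList buf.reverse), [], 0)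
      else
        (out, buf ++ [c], if c == PySem.Chars.upperChar c then n + 1 else n))
    ([], [], 0)
  st.1 ++ List.replicate st.2.2 (String.ofList st.2.1.reverse)

-- ===== PRECONDITION & SPEC =====
def Spec_reversed_list (str_inp : String) (out : List String) : Prop := out = reversed_list_alt str_inp
instance (str_inp : String) (out : List String) : Decidable (Spec_reversed_list str_inp out) := by unfold Spec_reversed_list; infer_instance

-- ===== CLAIM (what is proved, stated in full; the proofs are below) =====
def Claim_equal_reversed_list : Prop := ∀ (str_inp : String), Dom_reversed_list str_inp → Spec_reversed_list str_inp (reversed_list str_inp)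

-- ===== LEMMAS AND PROOFS =====

-- what both sides produce per word list: one copy of the reversed word per uppercase-equal char
def pvEmit (ws : List (List Char)) : List String :=
  ws.flatMap (fun w =>
    List.replicate (w.countP (fun j => j == PySem.Chars.upperChar j)) (String.ofList w.reverse))

-- split₀.go's accumulator is the already-finished words, reversed
theorem split_go_acc (cs : List Char) : ∀ (cur : List Char) (acc : List (List Char)),
    PySem.Chars.split₀.go cs cur acc = acc.reverse ++ PySem.Chars.split₀.go cs cur [] := by
  induction cs with
  | nil =>
    intro cur acc
    by_cases h : cur.isEmpty
    · simp [PySem.Chars.split₀.go, h]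
    · simp [PySem.Chars.split₀.go, h]
  | cons c rest ih =>
    intro cur acc
    by_cases hs : PySem.Chars.isspace c
    · by_cases h : cur.isEmpty
      · simp only [PySem.Chars.split₀.go, hs, h, if_true]
        exact ih [] acc
      · simp only [PySem.Chars.split₀.go, hs, h, if_true, if_false, Bool.false_eq_true]
        rw [ih [] (cur.reverse :: acc), ih [] [cur.reverse]]
        simp
    · simp only [PySem.Chars.split₀.go, hs, if_false, Bool.false_eq_true]
      exact ih (c :: cur) acc

-- appending r once per character satisfying p is appending (count p) copies of r
theorem foldl_append_const_eq_replicate {α β : Type} (p : α → Bool) (r : β) :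
    ∀ (l : List α) (acc : List β),
      l.foldl (fun acc j => if p j then acc ++ [r] else acc) acc
        = acc ++ List.replicate (l.countP p) r := by
  intro l
  induction l with
  | nil => intro acc; simp
  | cons x xs ih =>
    intro acc
    by_cases h : p x
    · simp [List.foldl, h, ih, List.replicate_succ]
    · simp [List.foldl, h, ih]

-- A equals pvEmit of the split words
theorem reversed_list_eq_emit (str_inp : String) :
    reversed_list str_inp = pvEmit (PySem.Chars.split₀ str_inp.toList) := by
  simp only [reversed_list]
  rw [PySem.List.foldl_pyRange_zero_pyGetD' (PySem.Str.split₀ str_inp) ""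
    (fun emp_list w =>
      w.toList.foldl
        (fun acc j =>
          if j == PySem.Chars.upperChar j then
            acc ++ [(PySem.Str.slice? w none none (-1)).getD ""]
          else acc)
        emp_list) []]
  have h : ∀ (ws : List (List Char)) (acc : List String),
      (ws.map String.ofList).foldl
        (fun emp_list w =>
          w.toList.foldl
            (fun a j =>
              if j == PySem.Chars.upperChar j then
                a ++ [(PySem.Str.slice? w none none (-1)).getD ""]
              else a)
            emp_list) acc = acc ++ pvEmit ws := by
    intro ws
    induction ws with
    | nil => intro acc; simp [pvEmit]
    | cons w rest ih =>
      intro acc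
      simp only [List.map, List.foldl]
      rw [foldl_append_const_eq_replicate (fun j => j == PySem.Chars.upperChar j)]
      rw [ih]
      have hw : (PySem.Str.slice? (String.ofList w) none none (-1)).getD ""
          = String.ofList w.reverse := by
        simp [pysem]
      simp [pvEmit, hw]
  have := h (PySem.Chars.split₀ str_inp.toList) []
  simpa [PySem.Str.split₀] using this

-- B's scan, related to split₀.go: invariant n = countP (· == upper ·) buf,
-- and go's reversed current word `cur` is buf.reverse
theorem scan_eq_emit (cs : List Char) : ∀ (out : List String) (buf : List Char),
    (let st := cs.foldl
      (fun (s : List String × List Char × Nat) c =>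
        let (o, b, n) := s
        if PySem.Chars.isspace c then
          (o ++ List.replicate n (String.ofList b.reverse), [], 0)
        else
          (o, b ++ [c], if c == PySem.Chars.upperChar c then n + 1 else n))
      (out, buf, buf.countP (fun j => j == PySem.Chars.upperChar j))
    st.1 ++ List.replicate st.2.2 (String.ofList st.2.1.reverse))
    = out ++ pvEmit (PySem.Chars.split₀.go cs buf.reverse []) := by
  induction cs with
  | nil =>
    intro out buf
    by_cases h : buf.isEmpty
    · have hbuf : buf = [] := by simpa [List.isEmpty_iff] using h
      simp [PySem.Chars.split₀.go, hbuf, pvEmit]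
    · have hbuf : buf ≠ [] := by simpa [List.isEmpty_iff] using h
      have h' : buf.reverse.isEmpty = false := by
        simp [List.isEmpty_eq_false_iff, List.reverse_eq_nil_iff, hbuf]
      simp [PySem.Chars.split₀.go, h', pvEmit]
  | cons c rest ih =>
    intro out buf
    by_cases hs : PySem.Chars.isspace c
    · simp only [List.foldl, hs, if_true]
      have hout := ih (out ++ List.replicate
        (buf.countP (fun j => j == PySem.Chars.upperChar j)) (String.ofList buf.reverse)) []
      simp only [List.countP_nil, List.reverse_nil] at hout
      rw [hout]
      by_cases h : buf.isEmpty
      · have hbuf : buf = [] := by simpa [List.isEmpty_iff] using h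
        simp only [PySem.Chars.split₀.go, hs, if_true, hbuf, List.reverse_nil,
          List.isEmpty_nil]
        simp [pvEmit]
      · have hbuf : buf ≠ [] := by simpa [List.isEmpty_iff] using h
        have h' : buf.reverse.isEmpty = false := by
          simp [List.isEmpty_eq_false_iff, List.reverse_eq_nil_iff, hbuf]
        simp only [PySem.Chars.split₀.go, hs, h', if_true, if_false, Bool.false_eq_true]
        rw [split_go_acc rest [] [buf.reverse.reverse]]
        simp [pvEmit]
    · simp only [List.foldl, hs, if_false, Bool.false_eq_true]
      have hn : (if c == PySem.Chars.upperChar c then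
            buf.countP (fun j => j == PySem.Chars.upperChar j) + 1
          else buf.countP (fun j => j == PySem.Chars.upperChar j))
          = (buf ++ [c]).countP (fun j => j == PySem.Chars.upperChar j) := by
        by_cases hc : c == PySem.Chars.upperChar c <;> simp [hc]
      rw [hn, ih out (buf ++ [c])]
      simp only [PySem.Chars.split₀.go, hs, if_false, Bool.false_eq_true,
        List.reverse_append, List.reverse_cons, List.reverse_nil, List.nil_append,
        List.singleton_append]

theorem reversed_list_alt_eq_emit (str_inp : String) :
    reversed_list_alt str_inp = pvEmit (PySem.Chars.split₀ str_inp.toList) := by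
  have := scan_eq_emit str_inp.toList [] []
  simpa [reversed_list_alt, PySem.Chars.split₀] using this

-- ===== VERDICT (by name: the statement is the Claim_ definition above) =====
theorem reversed_list_spec : Claim_equal_reversed_list := by
  intro s _
  unfold Spec_reversed_list
  rw [reversed_list_eq_emit, reversed_list_alt_eq_emit]
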